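-- pv_equiv track=rewrite | github.com/nishadianjalika/Wikipedia_Page_Analysis | wikidata/extract_sub_topics.py | extract_subtopics
-- ===== SOURCE A (Python) =====
-- def extract_subtopics(content):
--     subtopics = []
--     relevant_content = []
--     lines = content.split('\n')
--     current_subtopic = None
--     current_content = []
--
--     for line in lines:
--         if line.startswith("==") and line.endswith("=="):
--             if current_subtopic is not None:
--                 # Add the previous subtopic and its content
--                 subtopics.append(current_subtopic)
--                 relevant_content.append(' '.join(current_content).strip())
--             current_subtopic = line[2:-2].strip()
--             current_content = []
--         else:
--             current_content.append(line.strip())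
--
--     if current_subtopic is not None:
--         # Add the last subtopic and its content
--         subtopics.append(current_subtopic)
--         relevant_content.append(' '.join(current_content).strip())
--
--     return subtopics, relevant_content
-- ===== SOURCE B (Python) =====
-- def _is_header(line):
--     return line.startswith("==") and line.endswith("==")
--
--
-- def _blocks(lines):
--     # lines[0] is a header line
--     k = 1
--     while k < len(lines) and not _is_header(lines[k]):
--         k += 1
--     sub = lines[0][2:-2].strip()
--     cont = ' '.join(l.strip() for l in lines[1:k]).strip()
--     if k < len(lines):
--         subs, conts = _blocks(lines[k:])
--     else:
--         subs, conts = [], []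
--     return [sub] + subs, [cont] + conts
--
--
-- def extract_subtopics(content):
--     lines = content.split('\n')
--     i = 0
--     while i < len(lines) and not _is_header(lines[i]):
--         i += 1
--     if i < len(lines):
--         return _blocks(lines[i:])
--     return [], []
-- ===== Notes on version B (the rewrite author's own statement) =====
-- stated objective: alternative
-- what changed: A's single pass with a current-subtopic/current-content accumulator and a final flush is replaced by skipping the pre-header prefix and then recursing on header-delimited blocks, each block taking its body lines up to the next header.
import Mathlib
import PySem

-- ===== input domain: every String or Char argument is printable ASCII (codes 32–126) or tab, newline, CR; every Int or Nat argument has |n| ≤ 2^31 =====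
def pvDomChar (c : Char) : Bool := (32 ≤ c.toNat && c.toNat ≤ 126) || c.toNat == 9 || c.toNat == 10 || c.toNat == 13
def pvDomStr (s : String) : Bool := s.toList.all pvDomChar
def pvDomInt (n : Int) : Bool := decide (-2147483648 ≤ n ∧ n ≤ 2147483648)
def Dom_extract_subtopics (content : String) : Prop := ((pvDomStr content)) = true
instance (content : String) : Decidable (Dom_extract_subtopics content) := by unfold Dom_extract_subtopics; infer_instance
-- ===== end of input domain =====

-- B re-implements A's single-pass accumulator loop as recursion on header-delimited blocks
-- (skip the pre-header prefix, then take each header with its body up to the next header):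
-- a different decomposition of the same parse, similar cost (objective: alternative).

-- ===== PORT A =====
-- A's loop state: (subtopics, relevant_content, current_subtopic, current_content); lines as List Char
def stepA (st : List String × List String × Option (List Char) × List (List Char))
    (line : List Char) : List String × List String × Option (List Char) × List (List Char) :=
  let (subs, conts, cur, acc) := st
  if PySem.Chars.startswith line ['=', '='] && PySem.Chars.endswith line ['=', '='] then
    match cur with
    | some s =>
        (subs ++ [String.ofList s],
         conts ++ [String.ofList (PySem.Chars.strip (PySem.Chars.join [' '] acc))],
         some (PySem.Chars.strip (PySem.Chars.slice line (some 2) (some (-2)))), [])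
    | none =>
        (subs, conts, some (PySem.Chars.strip (PySem.Chars.slice line (some 2) (some (-2)))), [])
  else
    (subs, conts, cur, acc ++ [PySem.Chars.strip line])

-- A's final flush after the loop
def finishA (st : List String × List String × Option (List Char) × List (List Char)) :
    List String × List String :=
  match st with
  | (subs, conts, some s, acc) =>
      (subs ++ [String.ofList s],
       conts ++ [String.ofList (PySem.Chars.strip (PySem.Chars.join [' '] acc))])
  | (subs, conts, none, _) => (subs, conts)

def extract_subtopics (content : String) : List String × List String :=
  let lines := PySem.Chars.splitOn content.toList ['\n']
  finishA (lines.foldl stepA ([], [], none, []))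

-- ===== PORT B =====
def isHeaderB (line : List Char) : Bool :=
  PySem.Chars.startswith line ['=', '='] && PySem.Chars.endswith line ['=', '=']

-- B's recursion: the first line is a header; its body runs to the next header, then recurse.
def blocksB : List (List Char) → List String × List String
  | [] => ([], [])
  | h :: t =>
    let body := t.takeWhile (fun l => !isHeaderB l)
    let rest := t.dropWhile (fun l => !isHeaderB l)
    let (subs, conts) := blocksB rest
    (String.ofList (PySem.Chars.strip (PySem.Chars.slice h (some 2) (some (-2)))) :: subs,
     String.ofList (PySem.Chars.strip (PySem.Chars.join [' '] (body.map PySem.Chars.strip))) :: conts)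
termination_by l => l.length
decreasing_by
  exact Nat.lt_succ_of_le (List.length_dropWhile_le _ _)

def extract_subtopics_alt (content : String) : List String × List String :=
  let lines := PySem.Chars.splitOn content.toList ['\n']
  blocksB (lines.dropWhile (fun l => !isHeaderB l))

-- ===== PRECONDITION & SPEC =====
def Spec_extract_subtopics (content : String) (out : List String × List String) : Prop := out = extract_subtopics_alt content
instance (content : String) (out : List String × List String) : Decidable (Spec_extract_subtopics content out) := by unfold Spec_extract_subtopics; infer_instance

-- ===== CLAIM (what is proved, stated in full; the proofs are below) =====
def Claim_equal_extract_subtopics : Prop := ∀ (content : String), Dom_extract_subtopics content → Spec_extract_subtopics content (extract_subtopics content)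

-- ===== LEMMAS AND PROOFS =====

theorem blocksB_nil : blocksB [] = ([], []) := by rw [blocksB]

theorem blocksB_cons (h : List Char) (t : List (List Char)) :
    blocksB (h :: t) =
      (String.ofList (PySem.Chars.strip (PySem.Chars.slice h (some 2) (some (-2))))
         :: (blocksB (t.dropWhile (fun l => !isHeaderB l))).1,
       String.ofList (PySem.Chars.strip (PySem.Chars.join [' ']
           ((t.takeWhile (fun l => !isHeaderB l)).map PySem.Chars.strip)))
         :: (blocksB (t.dropWhile (fun l => !isHeaderB l))).2) := by
  rw [blocksB]

-- Invariant while a subtopic is open: the flushed loop result is the open block plus blocksB of the rest.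
theorem foldA_some (lines : List (List Char)) :
    ∀ (S C : List String) (s : List Char) (acc : List (List Char)),
    finishA (lines.foldl stepA (S, C, some s, acc)) =
      (S ++ String.ofList s :: (blocksB (lines.dropWhile (fun l => !isHeaderB l))).1,
       C ++ String.ofList (PySem.Chars.strip (PySem.Chars.join [' ']
              (acc ++ (lines.takeWhile (fun l => !isHeaderB l)).map PySem.Chars.strip)))
         :: (blocksB (lines.dropWhile (fun l => !isHeaderB l))).2) := by
  induction lines with
  | nil => intro S C s acc; simp [finishA, blocksB_nil]
  | cons l ls ih =>
    intro S C s acc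
    by_cases h : isHeaderB l = true
    · have hstep : stepA (S, C, some s, acc) l =
          (S ++ [String.ofList s],
           C ++ [String.ofList (PySem.Chars.strip (PySem.Chars.join [' '] acc))],
           some (PySem.Chars.strip (PySem.Chars.slice l (some 2) (some (-2)))), []) := by
        have h' : (PySem.Chars.startswith l ['=', '='] && PySem.Chars.endswith l ['=', '=']) = true := h
        simp [stepA, h']
      have hd : List.dropWhile (fun l => !isHeaderB l) (l :: ls) = l :: ls := by
        rw [List.dropWhile_cons]; simp [h]
      have ht : List.takeWhile (fun l => !isHeaderB l) (l :: ls) = [] := by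
        rw [List.takeWhile_cons]; simp [h]
      rw [List.foldl_cons, hstep, ih, hd, ht, blocksB_cons]
      simp [List.append_assoc]
    · have hd : List.dropWhile (fun l => !isHeaderB l) (l :: ls) =
          List.dropWhile (fun l => !isHeaderB l) ls := by
        rw [List.dropWhile_cons]; simp [h]
      have ht : List.takeWhile (fun l => !isHeaderB l) (l :: ls) =
          l :: List.takeWhile (fun l => !isHeaderB l) ls := by
        rw [List.takeWhile_cons]; simp [h]
      have hstep : stepA (S, C, some s, acc) l =
          (S, C, some s, acc ++ [PySem.Chars.strip l]) := by
        have h' : ¬(PySem.Chars.startswith l ['=', '='] && PySem.Chars.endswith l ['=', '=']) = true := h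
        simp [stepA, h']
      rw [List.foldl_cons, hstep, ih, hd, ht]
      simp [List.append_assoc]
-- Invariant before the first header: everything accumulated so far is discarded.
theorem foldA_none (lines : List (List Char)) :
    ∀ (S C : List String) (acc : List (List Char)),
    finishA (lines.foldl stepA (S, C, none, acc)) =
      (S ++ (blocksB (lines.dropWhile (fun l => !isHeaderB l))).1,
       C ++ (blocksB (lines.dropWhile (fun l => !isHeaderB l))).2) := by
  induction lines with
  | nil => intro S C acc; simp [finishA, blocksB_nil]
  | cons l ls ih =>
    intro S C acc
    by_cases h : isHeaderB l = true
    · have hstep : stepA (S, C, none, acc) l =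
          (S, C, some (PySem.Chars.strip (PySem.Chars.slice l (some 2) (some (-2)))), []) := by
        have h' : (PySem.Chars.startswith l ['=', '='] && PySem.Chars.endswith l ['=', '=']) = true := h
        simp [stepA, h']
      have hd : List.dropWhile (fun l => !isHeaderB l) (l :: ls) = l :: ls := by
        rw [List.dropWhile_cons]; simp [h]
      rw [List.foldl_cons, hstep, foldA_some, hd, blocksB_cons]
      simp
    · have hd : List.dropWhile (fun l => !isHeaderB l) (l :: ls) =
          List.dropWhile (fun l => !isHeaderB l) ls := by
        rw [List.dropWhile_cons]; simp [h]
      have hstep : stepA (S, C, none, acc) l =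
          (S, C, none, acc ++ [PySem.Chars.strip l]) := by
        have h' : ¬(PySem.Chars.startswith l ['=', '='] && PySem.Chars.endswith l ['=', '=']) = true := h
        simp [stepA, h']
      rw [List.foldl_cons, hstep, ih, hd]

-- ===== VERDICT (by name: the statement is the Claim_ definition above) =====
theorem extract_subtopics_spec : Claim_equal_extract_subtopics := by
  intro content _
  unfold Spec_extract_subtopics extract_subtopics extract_subtopics_alt
  rw [foldA_none]
  simp
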